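-- pv_equiv track=rewrite | github.com/danigallegdup/Optimization-Algorithms | Longest_Proccessing_Time_First.py | lpt_3_approximation
-- ===== SOURCE A (Python) =====
-- import heapq
--
-- def lpt_3_approximation(jobs, p):
--     """
--     3-Approximation algorithm for minimizing the makespan using LPT (Longest Processing Time first).
--
--     :param jobs: A list of job processing times.
--     :param p: The number of identical processors.
--     :return: The estimated makespan using the 3-approximation LPT algorithm.
--     """
--     # Sort the jobs in decreasing order of processing time
--     jobs_sorted = sorted(jobs, reverse=True)
--
--     # Initialize a min-heap to represent the processors (each element is the total load on that processor)
--     processors = [0] * p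
--     heapq.heapify(processors)
--
--     # Greedily assign each job to the processor with the least current load
--     for job in jobs_sorted:
--         # Get the processor with the least load (smallest element in the heap)
--         min_load = heapq.heappop(processors)
--         # Assign the job to this processor
--         min_load += job
--         # Push the updated load back into the heap
--         heapq.heappush(processors, min_load)
--
--     # The makespan is the maximum load on any processor (i.e., the largest element in the heap)
--     return max(processors)
-- ===== SOURCE B (Python) =====
-- def lpt_3_approximation(jobs, p):
--     loads = [0] * p          # loads kept in ascending order
--     for job in sorted(jobs, reverse=True):
--         new = loads.pop(0) + job          # least-loaded processor is first
--         lo, hi = 0, len(loads)            # bisect_right by hand (no extra imports)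
--         while lo < hi:
--             mid = (lo + hi) // 2
--             if loads[mid] <= new:
--                 lo = mid + 1
--             else:
--                 hi = mid
--         loads.insert(lo, new)
--     return max(loads)
-- ===== Notes on version B (the rewrite author's own statement) =====
-- stated objective: alternative
-- what changed: Replaces the heapq priority queue with a plain ascending-sorted list of loads: pop the first (least-loaded) entry, add the job, re-insert it by a hand-rolled bisect_right binary search; the greedy is the same and its final load multiset is tie-break independent, so the makespan is identical.
import Mathlib
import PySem

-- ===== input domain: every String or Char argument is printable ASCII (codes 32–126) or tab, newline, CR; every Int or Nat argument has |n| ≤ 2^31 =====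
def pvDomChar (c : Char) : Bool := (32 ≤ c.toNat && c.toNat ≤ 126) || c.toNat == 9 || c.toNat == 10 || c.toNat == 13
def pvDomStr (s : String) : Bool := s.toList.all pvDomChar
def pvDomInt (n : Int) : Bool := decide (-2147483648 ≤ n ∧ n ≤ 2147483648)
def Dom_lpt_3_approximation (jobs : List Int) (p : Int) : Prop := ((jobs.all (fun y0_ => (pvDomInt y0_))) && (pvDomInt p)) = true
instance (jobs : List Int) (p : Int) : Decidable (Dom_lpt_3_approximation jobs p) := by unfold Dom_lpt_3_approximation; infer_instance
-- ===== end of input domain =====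

-- B replaces A's heapq priority queue with an ascending-sorted list of loads
-- (pop the least, re-insert by a hand-rolled bisect_right); alternative data
-- structure, same greedy, not claimed faster.


-- ===== PORT A =====
-- The heap is modelled as the multiset of loads: heappop returns the minimum
-- (exact: that is heappop's return value) and heappush appends; the heap's internal
-- array order never affects A's result, which only reads the popped minima and max().
def lpt_3_approximation (jobs : List Int) (p : Int) : Int :=
  let jobs_sorted := PySem.List.sorted jobs (fun x => x) true
  let processors : List Int := List.replicate p.toNat 0
  let final := jobs_sorted.foldl (fun procs job =>
      match PySem.List.min? procs (fun x => x) with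
      | none => procs          -- heappop on empty heap: IndexError, excluded by Pre_
      | some m => procs.erase m ++ [m + job]) processors
  (PySem.List.max? final (fun x => x)).getD 0   -- max([]): ValueError, excluded by Pre_

-- ===== PORT B =====
-- Source B's hand-written 'while lo < hi: mid = (lo+hi)//2; if loads[mid] <= new: lo = mid+1
-- else: hi = mid' is exactly the bisect_right binary search ('loads[mid] <= new' is
-- 'not (new < loads[mid])'), i.e. PySem.List.bisectRight, the library form of that loop.
def lpt_3_approximation_alt (jobs : List Int) (p : Int) : Int :=
  let init : List Int := List.replicate p.toNat 0
  let final := (PySem.List.sorted jobs (fun x => x) true).foldl (fun loads job =>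
      match PySem.List.pop? loads 0 with
      | none => loads          -- loads.pop(0) on []: IndexError, excluded by Pre_
      | some (hd, rest) =>
        let new := hd + job
        PySem.List.insert rest ((PySem.List.bisectRight rest new : Nat) : Int) new) init
  (PySem.List.max? final (fun x => x)).getD 0   -- max([]): ValueError, excluded by Pre_

-- ===== PRECONDITION & SPEC =====
-- Pre_ excludes p ≤ 0, where the Python A raises (IndexError from heappop on an
-- empty heap if jobs ≠ [], else ValueError from max([])); B raises there too.
def Pre_lpt_3_approximation (_jobs : List Int) (p : Int) : Prop := 1 ≤ p
instance (jobs : List Int) (p : Int) : Decidable (Pre_lpt_3_approximation jobs p) := by unfold Pre_lpt_3_approximation; infer_instance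
def pvWitness_lpt_3_approximation : List Int × Int := ([3, 1, 2, 7, 2], 2)

def Spec_lpt_3_approximation (jobs : List Int) (p : Int) (out : Int) : Prop := out = lpt_3_approximation_alt jobs p
instance (jobs : List Int) (p : Int) (out : Int) : Decidable (Spec_lpt_3_approximation jobs p out) := by unfold Spec_lpt_3_approximation; infer_instance

-- ===== CLAIM (what is proved, stated in full; the proofs are below) =====
def Claim_equal_lpt_3_approximation : Prop := ∀ (jobs : List Int) (p : Int), Dom_lpt_3_approximation jobs p → Pre_lpt_3_approximation jobs p → Spec_lpt_3_approximation jobs p (lpt_3_approximation jobs p)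

-- ===== LEMMAS AND PROOFS =====

-- min? (key id) is the unique minimum value: equal on permutations.
theorem min?_perm_eq (l1 l2 : List Int) (h : l1.Perm l2) :
    PySem.List.min? l1 (fun x => x) = PySem.List.min? l2 (fun x => x) := by
  rcases h1 : PySem.List.min? l1 (fun x => x) with _ | m1
  · rw [PySem.List.min?_eq_none_iff _ _] at h1
    subst h1
    rw [← h.nil_eq]
    rfl
  · rcases h2 : PySem.List.min? l2 (fun x => x) with _ | m2
    · rw [PySem.List.min?_eq_none_iff _ _] at h2
      subst h2
      simp [(PySem.List.min?_eq_none_iff _ _).mpr h.eq_nil] at h1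
    · have hm1 := PySem.List.min?_mem h1
      have hm2 := PySem.List.min?_mem h2
      have h12 : m1 ≤ m2 := PySem.List.min?_isMin h1 m2 (h.symm.mem_iff.mp hm2)
      have h21 : m2 ≤ m1 := PySem.List.min?_isMin h2 m1 (h.mem_iff.mp hm1)
      exact congrArg some (le_antisymm h12 h21)

theorem max?_perm_eq (l1 l2 : List Int) (h : l1.Perm l2) :
    PySem.List.max? l1 (fun x => x) = PySem.List.max? l2 (fun x => x) := by
  rcases h1 : PySem.List.max? l1 (fun x => x) with _ | m1
  · rw [PySem.List.max?_eq_none_iff _ _] at h1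
    subst h1
    rw [← h.nil_eq]
    rfl
  · rcases h2 : PySem.List.max? l2 (fun x => x) with _ | m2
    · rw [PySem.List.max?_eq_none_iff _ _] at h2
      subst h2
      simp [(PySem.List.max?_eq_none_iff _ _).mpr h.eq_nil] at h1
    · have hm1 := PySem.List.max?_mem h1
      have hm2 := PySem.List.max?_mem h2
      have h12 : m2 ≤ m1 := PySem.List.max?_isMax h1 m2 (h.symm.mem_iff.mp hm2)
      have h21 : m1 ≤ m2 := PySem.List.max?_isMax h2 m1 (h.mem_iff.mp hm1)
      exact congrArg some (le_antisymm h21 h12)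

-- On a permutation of a sorted nonempty list, min? is the sorted list's head.
theorem min?_eq_head (l1 : List Int) (hd : Int) (rest : List Int)
    (hp : l1.Perm (hd :: rest)) (hs : (hd :: rest).Pairwise (· ≤ ·)) :
    PySem.List.min? l1 (fun x => x) = some hd := by
  rw [min?_perm_eq l1 (hd :: rest) hp]
  rcases hm : PySem.List.min? (hd :: rest) (fun x => x) with _ | m
  · rw [PySem.List.min?_eq_none_iff _ _] at hm
    cases hm
  · have hmem := PySem.List.min?_mem hm
    have h1 : m ≤ hd := PySem.List.min?_isMin hm hd (by simp)
    have h2 : hd ≤ m := by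
      rcases List.mem_cons.mp hmem with rfl | hmr
      · exact le_refl m
      · exact (List.pairwise_cons.mp hs).1 m hmr
    exact congrArg some (le_antisymm h1 h2)

-- Inserting v at bisect_right's position keeps the list sorted.
theorem insort_sorted (l : List Int) (v : Int) (hs : l.Pairwise (· ≤ ·)) :
    (l.take (PySem.List.bisectRight l v) ++ v :: l.drop (PySem.List.bisectRight l v)).Pairwise (· ≤ ·) := by
  obtain ⟨hk, hlo, hhi⟩ := PySem.List.bisectRight_spec l v hs
  have hmem_take : ∀ a ∈ l.take (PySem.List.bisectRight l v), a ≤ v := by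
    intro a ha
    obtain ⟨j, hj, rfl⟩ := List.mem_take_iff_getElem.mp ha
    exact hlo j (lt_of_lt_of_le hj (min_le_right _ _)) (lt_of_lt_of_le hj (min_le_left _ _))
  have hmem_drop : ∀ b ∈ l.drop (PySem.List.bisectRight l v), v ≤ b := by
    intro b hb
    obtain ⟨j, hj, rfl⟩ := List.mem_drop_iff_getElem.mp hb
    exact le_of_lt (hhi _ (by omega) (by omega))
  rw [List.pairwise_append]
  refine ⟨hs.sublist (List.take_sublist _ _), ?_, ?_⟩
  · rw [List.pairwise_cons]
    exact ⟨hmem_drop, hs.sublist (List.drop_sublist _ _)⟩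
  · intro a ha b hb
    rcases List.mem_cons.mp hb with rfl | hb'
    · exact hmem_take a ha
    · exact le_trans (hmem_take a ha) (hmem_drop b hb')

-- One greedy step: A's state stays a permutation of B's, and B's stays sorted.
theorem step_perm_sorted (l1 : List Int) (hd : Int) (rest : List Int) (job : Int)
    (hp : l1.Perm (hd :: rest)) (hs : (hd :: rest).Pairwise (· ≤ ·)) :
    (l1.erase hd ++ [hd + job]).Perm
      (PySem.List.insert rest ((PySem.List.bisectRight rest (hd + job) : Nat) : Int) (hd + job)) ∧
    (PySem.List.insert rest ((PySem.List.bisectRight rest (hd + job) : Nat) : Int) (hd + job)).Pairwise (· ≤ ·) := by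
  have hrest : rest.Pairwise (· ≤ ·) := (List.pairwise_cons.mp hs).2
  have hk : PySem.List.bisectRight rest (hd + job) ≤ rest.length :=
    (PySem.List.bisectRight_spec rest (hd + job) hrest).1
  rw [PySem.List.insert_natCast rest _ _ hk]
  constructor
  · have h1 : (l1.erase hd ++ [hd + job]).Perm ((hd + job) :: l1.erase hd) :=
      List.perm_append_singleton _ _
    have h2 : (l1.erase hd).Perm rest := by
      have h := hp.erase hd
      rwa [List.erase_cons_head] at h
    have h3 : (List.take (PySem.List.bisectRight rest (hd + job)) rest ++
        (hd + job) :: List.drop (PySem.List.bisectRight rest (hd + job)) rest).Perm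
        ((hd + job) :: rest) := by
      have h := List.perm_middle (a := hd + job)
        (l₁ := List.take (PySem.List.bisectRight rest (hd + job)) rest)
        (l₂ := List.drop (PySem.List.bisectRight rest (hd + job)) rest)
      rwa [List.take_append_drop] at h
    exact (h1.trans (h2.cons _)).trans h3.symm
  · exact insort_sorted rest (hd + job) hrest

theorem fold_perm_sorted (js : List Int) (l1 l2 : List Int)
    (hp : l1.Perm l2) (hs : l2.Pairwise (· ≤ ·)) :
    (js.foldl (fun procs job =>
      match PySem.List.min? procs (fun x => x) with
      | none => procs
      | some m => procs.erase m ++ [m + job]) l1).Perm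
    (js.foldl (fun loads job =>
      match PySem.List.pop? loads 0 with
      | none => loads
      | some (hd, rest) =>
        let new := hd + job
        PySem.List.insert rest ((PySem.List.bisectRight rest new : Nat) : Int) new) l2) := by
  induction js generalizing l1 l2 with
  | nil => exact hp
  | cons j t ih =>
    cases l2 with
    | nil =>
      have h1 : l1 = [] := hp.eq_nil
      subst h1
      exact ih [] [] (List.Perm.refl _) hs
    | cons hd rest =>
      have hmin := min?_eq_head l1 hd rest hp hs
      obtain ⟨hperm, hsort⟩ := step_perm_sorted l1 hd rest j hp hs
      simp only [List.foldl_cons, hmin, PySem.List.pop?_zero_cons]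
      exact ih _ _ hperm hsort

-- ===== VERDICT (by name: the statement is the Claim_ definition above) =====
theorem lpt_3_approximation_spec : Claim_equal_lpt_3_approximation := by
  intro jobs p _ _
  unfold Spec_lpt_3_approximation lpt_3_approximation lpt_3_approximation_alt
  simp only
  rw [max?_perm_eq _ _ (fold_perm_sorted _ _ _ (List.Perm.refl _) (List.pairwise_replicate.mpr (by simp)))]
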